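-- pv_equiv track=rewrite | github.com/YezzuzBruno/ADA | insertionSort/generarTodosCasosMerge.py | generar_arreglos_worst_case
-- ===== SOURCE A (Python) =====
-- def generar_arreglos_worst_case(n):
--     """Genera arreglos que maximizan comparaciones en Merge Sort"""
--     result = []
--     for i in range(0, n+1, 100):
--         # Crear un arreglo que fuerce el máximo número de comparaciones
--         lista = []
--         mitad = i // 2
--         for j in range(1, mitad + 1):
--             lista.append(j)
--             lista.append(j + mitad)
--         if i % 2 != 0:  # Si es impar, agregar el último elemento
--             lista.append(i)
--         result.append(lista)
--     return result
-- ===== SOURCE B (Python) =====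
-- def generar_arreglos_worst_case(n):
--     """Genera arreglos que maximizan comparaciones en Merge Sort"""
--     result = []
--     for i in range(0, n + 1, 100):
--         m = i // 2
--         # preallocate and write the two halves into the even/odd strided slices
--         lista = [0] * i
--         lista[::2] = range(1, m + 1)
--         lista[1::2] = range(m + 1, 2 * m + 1)
--         result.append(lista)
--     return result
-- ===== Notes on version B (the rewrite author's own statement) =====
-- stated objective: alternative
-- what changed: The inner append-two-at-a-time loop (and the dead odd-length branch, unreachable since the outer index is always a multiple of 100) is replaced by preallocating a zero list and assigning the lower and upper halves into the even and odd strided slices.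
import Mathlib
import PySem

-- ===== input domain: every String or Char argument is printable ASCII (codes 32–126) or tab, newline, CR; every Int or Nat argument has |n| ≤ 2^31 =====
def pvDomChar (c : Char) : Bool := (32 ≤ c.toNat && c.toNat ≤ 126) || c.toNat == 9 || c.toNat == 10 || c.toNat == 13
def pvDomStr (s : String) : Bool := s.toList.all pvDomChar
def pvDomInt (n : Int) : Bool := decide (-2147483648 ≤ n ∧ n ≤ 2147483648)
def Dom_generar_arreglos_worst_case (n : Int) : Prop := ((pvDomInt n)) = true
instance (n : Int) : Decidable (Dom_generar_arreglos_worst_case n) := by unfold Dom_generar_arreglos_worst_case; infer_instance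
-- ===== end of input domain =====

-- ===== PORT A =====
def generar_arreglos_worst_case (n : Int) : List (List Int) :=
  (PySem.List.pyRange 0 (n + 1) 100).foldl
    (fun result i =>
      let mitad := PySem.Int.floordiv i 2
      let lista :=
        (PySem.List.pyRange 1 (mitad + 1) 1).foldl
          (fun lista j => lista ++ [j] ++ [j + mitad]) []
      let lista := if PySem.Int.mod i 2 ≠ 0 then lista ++ [i] else lista
      result ++ [lista]) []

-- ===== PORT B =====
-- B replaces the append-two-at-a-time inner loop (and the dead odd branch) by preallocating
-- [0]*i and assigning the two halves into the even/odd strided slices; objective: alternative.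
-- Exact port of Python's extended-slice assignment `base[start::2] = vals` for the case
-- len(vals) == len(base[start::2]) (which holds at every call below, so Python never raises):
-- vals[k] is written to position start + 2*k.
def pySetSlice2 (base : List Int) (start : Nat) (vals : List Int) : List Int :=
  (vals.zipIdx).foldl (fun l p => l.set (start + 2 * p.2) p.1) base

def generar_arreglos_worst_case_alt (n : Int) : List (List Int) :=
  (PySem.List.pyRange 0 (n + 1) 100).foldl
    (fun result i =>
      let m := PySem.Int.floordiv i 2
      let lista := List.replicate i.toNat (0 : Int)
      let lista := pySetSlice2 lista 0 (PySem.List.pyRange 1 (m + 1) 1)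
      let lista := pySetSlice2 lista 1 (PySem.List.pyRange (m + 1) (2 * m + 1) 1)
      result ++ [lista]) []

-- ===== PRECONDITION & SPEC =====
def Spec_generar_arreglos_worst_case (n : Int) (out : List (List Int)) : Prop := out = generar_arreglos_worst_case_alt n
instance (n : Int) (out : List (List Int)) : Decidable (Spec_generar_arreglos_worst_case n out) := by unfold Spec_generar_arreglos_worst_case; infer_instance

-- ===== CLAIM (what is proved, stated in full; the proofs are below) =====
def Claim_equal_generar_arreglos_worst_case : Prop := ∀ (n : Int), Dom_generar_arreglos_worst_case n → Spec_generar_arreglos_worst_case n (generar_arreglos_worst_case n)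

-- ===== LEMMAS AND PROOFS =====

-- zipping two integer ranges of equal length pairs j with j + d
lemma zip_pyRange_shift (a b d : Int) :
    (PySem.List.pyRange a b 1).zip (PySem.List.pyRange (a + d) (b + d) 1)
      = (PySem.List.pyRange a b 1).map (fun j => (j, j + d)) := by
  rw [PySem.List.pyRange_one a b, PySem.List.pyRange_one (a + d) (b + d)]
  have h : (b + d - (a + d)) = b - a := by ring
  rw [h, List.zip_map', List.map_map]
  exact List.map_congr_left (fun k _ => by simp; ring)

-- every element of range(0, n+1, 100) has the form 100*k
lemma mem_outer_form (n i : Int) (h : i ∈ PySem.List.pyRange 0 (n + 1) 100) :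
    ∃ k : Nat, i = 100 * (k : Int) := by
  rw [PySem.List.pyRange_of_pos 0 (n + 1) (by norm_num)] at h
  obtain ⟨k, _, hk⟩ := List.mem_map.mp h
  exact ⟨k, by omega⟩

-- every element of range(0, n+1, 100) is even
lemma even_mem_outer (n i : Int) (h : i ∈ PySem.List.pyRange 0 (n + 1) 100) :
    PySem.Int.mod i 2 = 0 := by
  obtain ⟨k, rfl⟩ := mem_outer_form n i h
  have h100 : (100 : Int) * (k : Int) = 2 * (50 * k) := by ring
  simp [PySem.Int.mod, h100, Int.mul_fmod_right]

-- setting positions of the same parity further down a list commutes past two cons cells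
lemma foldl_set_cons2 (s t : Nat) (vs : List Int) (a b : Int) (l : List Int) :
    (vs.zipIdx (t + 1)).foldl (fun l p => l.set (s + 2 * p.2) p.1) (a :: b :: l)
      = a :: b :: (vs.zipIdx t).foldl (fun l p => l.set (s + 2 * p.2) p.1) l := by
  induction vs generalizing t a b l with
  | nil => simp
  | cons v vs ih =>
      rw [List.zipIdx_cons, List.zipIdx_cons]
      simp only [List.foldl_cons]
      have h1 : s + 2 * (t + 1) = (s + 2 * t) + 1 + 1 := by omega
      rw [h1]
      have h2 : (a :: b :: l).set ((s + 2 * t) + 1 + 1) v = a :: b :: l.set (s + 2 * t) v := rfl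
      rw [h2]
      exact ih (t + 1) a b (l.set (s + 2 * t) v)

-- writing xs into the even positions and ys into the odd positions of a zero list of
-- length 2*|xs| interleaves them
lemma interleave_core (xs : List Int) : ∀ (ys : List Int), xs.length = ys.length →
    pySetSlice2 (pySetSlice2 (List.replicate (2 * xs.length) 0) 0 xs) 1 ys
      = (xs.zip ys).flatMap (fun p => [p.1, p.2]) := by
  induction xs with
  | nil =>
      intro ys h
      cases ys with
      | nil => simp [pySetSlice2]
      | cons y ys => simp at h
  | cons x xs ih =>
      intro ys h
      cases ys with
      | nil => simp at h
      | cons y ys =>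
        have h' : xs.length = ys.length := by simpa using h
        have e1 : ∀ (L : List Int),
            pySetSlice2 (0 :: 0 :: L) 0 (x :: xs) = x :: 0 :: pySetSlice2 L 0 xs := by
          intro L
          unfold pySetSlice2
          rw [List.zipIdx_cons, List.foldl_cons]
          have hset : (0 :: 0 :: L).set (0 + 2 * 0) x = x :: 0 :: L := by simp
          rw [hset]
          exact foldl_set_cons2 0 0 xs x 0 L
        have e2 : ∀ (L : List Int),
            pySetSlice2 (x :: 0 :: L) 1 (y :: ys) = x :: y :: pySetSlice2 L 1 ys := by
          intro L
          unfold pySetSlice2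
          rw [List.zipIdx_cons, List.foldl_cons]
          have hset : (x :: 0 :: L).set (1 + 2 * 0) y = x :: y :: L := by simp [List.set]
          rw [hset]
          exact foldl_set_cons2 1 0 ys x y L
        have hrep : List.replicate (2 * (x :: xs).length) (0 : Int)
            = 0 :: 0 :: List.replicate (2 * xs.length) 0 := by
          have h2 : 2 * (x :: xs).length = 2 * xs.length + 1 + 1 := by
            simp only [List.length_cons]; omega
          rw [h2, List.replicate_succ, List.replicate_succ]
        rw [hrep, e1 _, e2 _, ih ys h']
        simp

-- for i = 100*k the two inner-array constructions agree
lemma inner_eq (i : Int) (k : Nat) (hk : i = 100 * (k : Int)) :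
    (PySem.List.pyRange 1 (PySem.Int.floordiv i 2 + 1) 1).foldl
        (fun lista j => lista ++ [j] ++ [j + PySem.Int.floordiv i 2]) []
      = pySetSlice2
          (pySetSlice2 (List.replicate i.toNat 0) 0
            (PySem.List.pyRange 1 (PySem.Int.floordiv i 2 + 1) 1)) 1
          (PySem.List.pyRange (PySem.Int.floordiv i 2 + 1) (2 * PySem.Int.floordiv i 2 + 1) 1) := by
  have hm' : PySem.Int.floordiv i 2 = 50 * (k : Int) := by
    rw [hk]
    have h100 : (100 : Int) * (k : Int) = 2 * (50 * k) := by ring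
    simp only [PySem.Int.floordiv, h100]
    exact Int.mul_fdiv_cancel_left _ (by norm_num)
  set xs := PySem.List.pyRange 1 (PySem.Int.floordiv i 2 + 1) 1 with hxs
  set ys := PySem.List.pyRange (PySem.Int.floordiv i 2 + 1) (2 * PySem.Int.floordiv i 2 + 1) 1 with hys
  have hlx : xs.length = 50 * k := by
    rw [hxs, PySem.List.length_pyRange_one, hm']; omega
  have hly : ys.length = 50 * k := by
    rw [hys, PySem.List.length_pyRange_one, hm']; omega
  have hrep : i.toNat = 2 * xs.length := by rw [hlx, hk]; omega
  rw [hrep, interleave_core xs ys (by rw [hlx, hly])]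
  have hzip : xs.zip ys = xs.map (fun j => (j, j + PySem.Int.floordiv i 2)) := by
    rw [hxs, hys]
    have h2 : 2 * PySem.Int.floordiv i 2 + 1
        = (PySem.Int.floordiv i 2 + 1) + PySem.Int.floordiv i 2 := by ring
    have h3 : PySem.Int.floordiv i 2 + 1 = 1 + PySem.Int.floordiv i 2 := by ring
    rw [h2, h3]
    exact zip_pyRange_shift 1 (1 + PySem.Int.floordiv i 2) (PySem.Int.floordiv i 2)
  rw [hzip, List.flatMap_map]
  simp only [List.append_assoc]
  rw [PySem.List.foldl_append_eq_flatMap (g := fun j => [j] ++ [j + PySem.Int.floordiv i 2])]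
  simp

-- ===== VERDICT (by name: the statement is the Claim_ definition above) =====
theorem generar_arreglos_worst_case_spec : Claim_equal_generar_arreglos_worst_case := by
  intro n _
  unfold Spec_generar_arreglos_worst_case generar_arreglos_worst_case generar_arreglos_worst_case_alt
  rw [PySem.List.foldl_append_singleton_eq_map, PySem.List.foldl_append_singleton_eq_map]
  simp only [List.nil_append]
  refine List.map_congr_left (fun i hi => ?_)
  have heven := even_mem_outer n i hi
  obtain ⟨k, hk⟩ := mem_outer_form n i hi
  simp only [heven, ne_eq, not_true_eq_false, if_neg, not_false_eq_true]
  exact inner_eq i k hk
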